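-- pv_equiv track=rewrite | github.com/pvtrov/algorithms-and-data-structures | exercises_from_course/excercises_from_bit_/before_exams/exam_6th/egzP6a/egzP6a.py | google
-- ===== SOURCE A (Python) =====
-- def put_into_buckets(buckets, passwords):
--     for password in passwords:
--         buckets[len(password)].append(password)
--
-- def sort_in(letters_number):
--     max_ = -1
--     right_bucket = []
--
--     for tuple in letters_number:
--         if tuple[0] > max_:
--             max_ = tuple[0]
--
--     buckets = [[] for _ in range(max_+1)]
--     for tuple in letters_number:
--         buckets[tuple[0]].append(tuple)
--
--     for i in range(len(buckets)-1, -1, -1):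
--         for j in range(len(buckets[i])):
--             right_bucket.append(buckets[i][j][1])
--
--     return right_bucket
--
-- def count_letters_and_sort(bucket):
--     letters_number = []
--
--     for word in bucket:
--         counter = 0
--         for letter in word:
--             if 97 <= ord(letter) <= 123:
--                 counter += 1
--         letters_number.append((counter, word))
--
--     return sort_in(letters_number)
--
-- def google(H, s):
--     max_ = -1
--
--     # O(n)
--     for password in H:
--         if len(password) > max_:
--             max_ = len(password)
--
--     buckets = [[] for _ in range(max_+1)]
--     # O(n)
--     put_into_buckets(buckets, H)
--
--     new_buckets = []
--     # O(nk)
--     for bucket in buckets: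
--         if bucket:
--             new_buckets.append(count_letters_and_sort(bucket))
--
--     strong_pass = []
--     for i in range(len(new_buckets)-1, -1, -1):
--         if new_buckets[i]:
--             strong_pass.extend(new_buckets[i])
--
--     return strong_pass[s-1]
-- ===== SOURCE B (Python) =====
-- def google(H, s):
--     def lc(w):
--         return sum(1 for c in w if 97 <= ord(c) <= 123)
--     return sorted(H, key=lambda w: (-len(w), -lc(w)))[s - 1]
-- ===== Notes on version B (the rewrite author's own statement) =====
-- stated objective: idiomatic
-- what changed: Replaces the multi-pass length-bucket + per-bucket counting-sort pipeline with a single stable sorted() call on the composite key (-len(w), -lowercase_count(w)) followed by indexing [s-1].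
import Mathlib
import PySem

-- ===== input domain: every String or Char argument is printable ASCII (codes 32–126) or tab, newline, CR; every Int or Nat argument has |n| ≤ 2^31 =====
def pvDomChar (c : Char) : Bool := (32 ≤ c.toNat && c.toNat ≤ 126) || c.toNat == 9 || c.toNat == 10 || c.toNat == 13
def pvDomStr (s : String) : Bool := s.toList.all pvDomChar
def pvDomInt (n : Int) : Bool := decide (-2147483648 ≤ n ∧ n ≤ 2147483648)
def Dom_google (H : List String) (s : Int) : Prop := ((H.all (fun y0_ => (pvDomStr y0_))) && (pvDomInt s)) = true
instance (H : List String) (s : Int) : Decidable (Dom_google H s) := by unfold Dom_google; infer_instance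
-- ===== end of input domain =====

-- B replaces A's multi-pass length-bucket + per-bucket counting-sort pipeline by one stable sort
-- on the composite key (-len(w), -lowercase_count(w)) followed by indexing [s-1]; objective: idiomatic.

-- ===== PORT A =====
def pvCountA (word : String) : Int :=
  word.toList.foldl
    (fun counter letter => if 97 ≤ letter.toNat ∧ letter.toNat ≤ 123 then counter + 1 else counter) 0

def pvSortIn (ln : List (Int × String)) : List String :=
  let max_ := ln.foldl (fun m t => if t.1 > m then t.1 else m) (-1)
  let buckets0 : List (List (Int × String)) := (PySem.List.pyRange 0 (max_ + 1) 1).map (fun _ => [])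
  let buckets := ln.foldl
    (fun bs t => PySem.List.pySetD bs t.1 (PySem.List.pyGetD bs t.1 [] ++ [t])) buckets0
  (PySem.List.pyRange (PySem.List.len buckets - 1) (-1) (-1)).foldl
    (fun rb i =>
      (PySem.List.pyRange 0 (PySem.List.len (PySem.List.pyGetD buckets i [])) 1).foldl
        (fun rb j => rb ++ [(PySem.List.pyGetD (PySem.List.pyGetD buckets i []) j ((0 : Int), "")).2]) rb)
    []

def pvCountLettersAndSort (bucket : List String) : List String :=
  pvSortIn (bucket.foldl (fun acc word => acc ++ [(pvCountA word, word)]) [])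

def pvPutIntoBuckets (buckets : List (List String)) (passwords : List String) : List (List String) :=
  passwords.foldl
    (fun bs p => PySem.List.pySetD bs (PySem.Str.len p) (PySem.List.pyGetD bs (PySem.Str.len p) [] ++ [p]))
    buckets

def google (H : List String) (s : Int) : String :=
  let max_ := H.foldl (fun m p => if PySem.Str.len p > m then PySem.Str.len p else m) (-1)
  let buckets0 : List (List String) := (PySem.List.pyRange 0 (max_ + 1) 1).map (fun _ => [])
  let buckets := pvPutIntoBuckets buckets0 H
  let newBuckets := buckets.foldl
    (fun nb bucket => if bucket ≠ [] then nb ++ [pvCountLettersAndSort bucket] else nb) []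
  let strongPass := (PySem.List.pyRange (PySem.List.len newBuckets - 1) (-1) (-1)).foldl
    (fun sp i => if PySem.List.pyGetD newBuckets i [] ≠ [] then sp ++ PySem.List.pyGetD newBuckets i [] else sp) []
  PySem.List.pyGetD strongPass (s - 1) ""

-- ===== PORT B =====
def pvLcB (w : String) : Int :=
  (w.toList.map (fun c => if 97 ≤ c.toNat ∧ c.toNat ≤ 123 then (1 : Int) else 0)).sum

def google_alt (H : List String) (s : Int) : String :=
  PySem.List.pyGetD
    (PySem.List.sorted2 H (fun w => -PySem.Str.len w) (fun w => -pvLcB w) false) (s - 1) ""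

-- ===== PRECONDITION & SPEC =====
-- Pre_ excludes exactly the inputs on which A raises IndexError: strong_pass has length len(H),
-- so A returns iff s-1 is a valid Python index into a list of that length.
def Pre_google (H : List String) (s : Int) : Prop :=
  -(H.length : Int) ≤ s - 1 ∧ s - 1 < (H.length : Int)
instance (H : List String) (s : Int) : Decidable (Pre_google H s) := by
  unfold Pre_google; infer_instance
def pvWitness_google : List String × Int := (["ab", "c"], 1)

def Spec_google (H : List String) (s : Int) (out : String) : Prop := out = google_alt H s
instance (H : List String) (s : Int) (out : String) : Decidable (Spec_google H s out) := by
  unfold Spec_google; infer_instance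

-- ===== CLAIM (what is proved, stated in full; the proofs are below) =====
def Claim_equal_google : Prop :=
  ∀ (H : List String) (s : Int), Dom_google H s → Pre_google H s → Spec_google H s (google H s)

-- ===== LEMMAS AND PROOFS =====

-- counting the composite key: T(len) + lc enumerates lex order of (len, lc) since lc ≤ len
def pvT : Nat → Nat
  | 0 => 0
  | n + 1 => pvT n + (n + 1)

lemma pvT_mono {a b : Nat} (h : a ≤ b) : pvT a ≤ pvT b := by
  induction h with
  | refl => exact le_refl _
  | step _ ih => exact le_trans ih (by simp [pvT])

def pvP (c : Char) : Bool := decide (97 ≤ c.toNat ∧ c.toNat ≤ 123)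
def pvLenN (w : String) : Nat := w.toList.length
def pvLcN (w : String) : Nat := w.toList.countP pvP
def pvCode (w : String) : Nat := pvT (pvLenN w) + pvLcN w
def pvKey (w : String) : Int := -(pvCode w : Int)

lemma pvLcN_le (w : String) : pvLcN w ≤ pvLenN w := List.countP_le_length

lemma pcode_lt {L1 c1 L2 c2 : Nat} (h1 : c1 ≤ L1)
    (h : L1 < L2 ∨ (L1 = L2 ∧ c1 < c2)) : pvT L1 + c1 < pvT L2 + c2 := by
  rcases h with h | ⟨rfl, h⟩
  · have h2 : pvT (L1 + 1) ≤ pvT L2 := pvT_mono h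
    simp only [pvT] at h2
    omega
  · omega

lemma pcode_eq_iff {L c : Nat} (hc : c ≤ L) (w : String) :
    pvCode w = pvT L + c ↔ (pvLenN w = L ∧ pvLcN w = c) := by
  constructor
  · intro h
    rcases Nat.lt_trichotomy (pvLenN w) L with hl | hl | hl
    · have := pcode_lt (pvLcN_le w) (Or.inl hl) (c2 := c)
      unfold pvCode at h; omega
    · unfold pvCode at h
      rw [hl] at h ⊢
      omega
    · have := pcode_lt hc (Or.inl hl) (c2 := pvLcN w)
      unfold pvCode at h; omega
  · rintro ⟨h1, h2⟩; unfold pvCode; rw [h1, h2]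

lemma code_lt_iff (a b : String) :
    pvCode b < pvCode a ↔ (pvLenN b < pvLenN a ∨ (pvLenN b = pvLenN a ∧ pvLcN b < pvLcN a)) := by
  rcases Nat.lt_trichotomy (pvLenN b) (pvLenN a) with h | h | h
  · exact ⟨fun _ => Or.inl h, fun _ => pcode_lt (pvLcN_le b) (Or.inl h)⟩
  · unfold pvCode
    rw [h]
    constructor
    · intro hlt; right; exact ⟨rfl, by omega⟩
    · rintro (h' | ⟨_, h'⟩) <;> omega
  · have := pcode_lt (pvLcN_le a) (Or.inl h) (c2 := pvLcN b)
    unfold pvCode at this ⊢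
    constructor
    · intro; omega
    · rintro (h' | ⟨h', _⟩) <;> omega

lemma pvCountA_eq (w : String) : pvCountA w = (pvLcN w : Int) := by
  unfold pvCountA pvLcN
  rw [show (fun (counter : Int) (letter : Char) =>
      if 97 ≤ letter.toNat ∧ letter.toNat ≤ 123 then counter + 1 else counter)
    = (fun (counter : Int) (letter : Char) => if pvP letter = true then counter + 1 else counter) by
      funext counter letter; simp [pvP]]
  rw [PySem.List.foldl_count_if]
  simp

lemma pvLcB_eq (w : String) : pvLcB w = (pvLcN w : Int) := by
  unfold pvLcB pvLcN
  rw [show (fun (c : Char) => if 97 ≤ c.toNat ∧ c.toNat ≤ 123 then (1 : Int) else 0)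
    = (fun (c : Char) => if pvP c = true then (1 : Int) else 0) by
      funext c; simp [pvP]]
  rw [PySem.List.sum_map_ite_one_zero]

-- generic flatMap congruence on members
lemma pvFlatMapCongr {α β : Type} {l : List α} {f g : α → List β}
    (h : ∀ x ∈ l, f x = g x) : l.flatMap f = l.flatMap g := by
  simp only [List.flatMap_def]
  rw [List.map_congr_left h]

-- canonical "blocks" form: filters in strictly descending composite-code order
def pvCanon (H : List String) (M : Nat) : List String :=
  ((List.range (pvT M)).reverse).flatMap (fun j => H.filter (fun w => pvCode w == j))

def pvBlocks (ks : List Int) (xs : List String) : List String :=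
  ks.flatMap (fun k => xs.filter (fun x => pvKey x == k))

lemma pvMemBlocks {ks : List Int} {ys : List String} {a : String}
    (h : a ∈ pvBlocks ks ys) : pvKey a ∈ ks := by
  simp only [pvBlocks, List.mem_flatMap, List.mem_filter, beq_iff_eq] at h
  obtain ⟨k, hk, -, hbeq⟩ := h
  exact hbeq ▸ hk

lemma pvInsertMiddle (before : String → String → Bool) (x : String) :
    ∀ (A B : List String), (∀ a ∈ A, before x a = false) → (∀ b ∈ B, before x b = true) →
      PySem.List.insertBy before x (A ++ B) = A ++ x :: B := by
  intro A
  induction A with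
  | nil =>
    intro B hA hB
    cases B with
    | nil => simp [PySem.List.insertBy]
    | cons b B' => simp [PySem.List.insertBy, hB b (by simp)]
  | cons a A' ih =>
    intro B hA hB
    have ha := hA a (by simp)
    simp only [List.cons_append]
    simp [PySem.List.insertBy, ha]
    exact ih B (fun a' h => hA a' (by simp [h])) hB

lemma pvSortBlocks (ks : List Int) (hks : ks.Pairwise (· < ·)) :
    ∀ xs : List String, (∀ x ∈ xs, pvKey x ∈ ks) →
      xs.foldl (fun acc x => PySem.List.insertBy (fun a b => decide (pvKey a < pvKey b)) x acc) []
        = pvBlocks ks xs := by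
  intro xs
  induction xs using List.reverseRecOn with
  | nil => intro _; simp [pvBlocks, List.flatMap_eq_nil_iff]
  | append_singleton xs x ih =>
    intro hmem
    rw [List.foldl_append, List.foldl_cons, List.foldl_nil,
      ih (fun y hy => hmem y (List.mem_append_left _ hy))]
    have hx : pvKey x ∈ ks := hmem x (by simp)
    obtain ⟨ks₁, ks₂, rfl⟩ := List.append_of_mem hx
    obtain ⟨hp1, hp2, hp12⟩ := List.pairwise_append.mp hks
    obtain ⟨hlt2, -⟩ := List.pairwise_cons.mp hp2
    have hlt1 : ∀ k ∈ ks₁, k < pvKey x := fun k hk => hp12 k hk _ (by simp)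
    have hsplit : ∀ ys : List String, pvBlocks (ks₁ ++ pvKey x :: ks₂) ys
        = pvBlocks ks₁ ys ++ (ys.filter (fun y => pvKey y == pvKey x) ++ pvBlocks ks₂ ys) := by
      intro ys; simp [pvBlocks, List.flatMap_append]
    rw [hsplit, hsplit, ← List.append_assoc]
    rw [pvInsertMiddle _ x
      (pvBlocks ks₁ xs ++ xs.filter (fun y => pvKey y == pvKey x)) (pvBlocks ks₂ xs)
      (by
        intro a hax
        rcases List.mem_append.mp hax with ha | ha
        · have := hlt1 _ (pvMemBlocks ha)
          simp only [decide_eq_false_iff_not]; omega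
        · have := List.of_mem_filter ha
          simp only [beq_iff_eq] at this
          simp only [decide_eq_false_iff_not]; omega)
      (by
        intro b hb
        have := hlt2 _ (pvMemBlocks hb)
        simp only [decide_eq_true_eq]; omega)]
    have h1 : pvBlocks ks₁ (xs ++ [x]) = pvBlocks ks₁ xs := by
      apply pvFlatMapCongr
      intro k hk
      rw [List.filter_append]
      have : pvKey x ≠ k := by have := hlt1 k hk; omega
      simp [this]
    have h2 : pvBlocks ks₂ (xs ++ [x]) = pvBlocks ks₂ xs := by
      apply pvFlatMapCongr
      intro k hk
      rw [List.filter_append]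
      have : pvKey x ≠ k := by have := hlt2 k hk; omega
      simp [this]
    have h3 : (xs ++ [x]).filter (fun y => pvKey y == pvKey x)
        = xs.filter (fun y => pvKey y == pvKey x) ++ [x] := by
      rw [List.filter_append]; simp
    rw [h1, h2, h3]
    simp [List.append_assoc]

-- max loops written with `if` are foldl max
lemma pvMaxFold {β : Type} (f : β → Int) (l : List β) (i : Int) :
    l.foldl (fun m t => if f t > m then f t else m) i = l.foldl (fun m t => max m (f t)) i := by
  apply PySem.List.foldl_congr_mem
  intro acc x _
  split_ifs with h
  · exact (max_eq_right (le_of_lt h)).symm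
  · exact (max_eq_left (not_lt.mp h)).symm

lemma pvBuckets0 {β : Type} (n : Int) :
    (PySem.List.pyRange 0 n 1).map (fun _ => ([] : List β)) = List.replicate n.toNat [] := by
  apply List.eq_replicate_iff.mpr
  constructor
  · simp [PySem.List.length_pyRange_one]
  · simp

lemma pvFill_length {β : Type} (f : β → Int) (ws : List β) : ∀ bs : List (List β),
    (ws.foldl (fun bs t => PySem.List.pySetD bs (f t) (PySem.List.pyGetD bs (f t) [] ++ [t])) bs).length
      = bs.length := by
  induction ws with
  | nil => intro bs; rfl
  | cons w ws ih => intro bs; rw [List.foldl_cons, ih, PySem.List.length_pySetD]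

lemma pvFill_getElem {β : Type} (f : β → Int) (ws : List β) : ∀ (bs : List (List β)),
    (∀ t ∈ ws, 0 ≤ f t ∧ (f t).toNat < bs.length) → ∀ (L : Nat) (hL : L < bs.length),
    (ws.foldl (fun bs t => PySem.List.pySetD bs (f t) (PySem.List.pyGetD bs (f t) [] ++ [t])) bs)[L]?
      = some (bs[L]'hL ++ ws.filter (fun t => f t == (L : Int))) := by
  induction ws with
  | nil =>
    intro bs _ L hL
    simp only [List.foldl_nil, List.filter_nil, List.append_nil]
    exact List.getElem?_eq_getElem hL
  | cons w ws ih =>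
    intro bs h L hL
    obtain ⟨hw0, hwlt⟩ := h w (List.mem_cons_self ..)
    rw [List.foldl_cons]
    have hset : PySem.List.pySetD bs (f w) (PySem.List.pyGetD bs (f w) [] ++ [w])
        = bs.set (f w).toNat (bs[(f w).toNat]'hwlt ++ [w]) := by
      rw [PySem.List.pySetD_of_nonneg _ _ hw0,
        PySem.List.pyGetD_eq_getElem _ _ hw0 (by omega)]
    rw [hset]
    rw [ih _ (by intro t ht; have := h t (List.mem_cons_of_mem _ ht); simpa [List.length_set] using this)
      L (by simpa [List.length_set] using hL)]
    rw [List.getElem_set]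
    by_cases hLn : (f w).toNat = L
    · have hfw : f w = (L : Int) := by omega
      simp [hfw]
    · have hfw : ¬ f w = (L : Int) := by omega
      simp [hLn, hfw]

lemma pvFill_eq {β : Type} (f : β → Int) (ws : List β) (M : Nat)
    (h : ∀ t ∈ ws, 0 ≤ f t ∧ (f t).toNat < M) :
    ws.foldl (fun bs t => PySem.List.pySetD bs (f t) (PySem.List.pyGetD bs (f t) [] ++ [t]))
        (List.replicate M ([] : List β))
      = (List.range M).map (fun (L : Nat) => ws.filter (fun t => f t == (L : Int))) := by
  apply List.ext_getElem?
  intro i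
  by_cases hi : i < M
  · have hLrep : i < (List.replicate M ([] : List β)).length := by simpa using hi
    rw [pvFill_getElem f ws _ (by simpa using h) i hLrep]
    rw [List.getElem?_eq_getElem (l := (List.range M).map _) (by simpa using hi)]
    simp [List.getElem_replicate]
  · rw [List.getElem?_eq_none (by rw [pvFill_length]; simp; omega),
      List.getElem?_eq_none (by simp; omega)]

-- descending index read-out
lemma pvDescFold {β : Type} (bs : List (List β)) : ∀ acc : List β,
    (PySem.List.pyRange (PySem.List.len bs - 1) (-1) (-1)).foldl
        (fun sp i => sp ++ PySem.List.pyGetD bs i []) acc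
      = acc ++ bs.reverse.flatten := by
  induction bs using List.reverseRecOn with
  | nil =>
    intro acc
    rw [show PySem.List.len ([] : List (List β)) - 1 = (-1 : Int) by simp [PySem.List.len_eq]]
    rw [PySem.List.pyRange_neg_one_eq_nil (by norm_num)]
    simp
  | append_singleton xs x ih =>
    intro acc
    have h1 : PySem.List.len (xs ++ [x]) - 1 = (xs.length : Int) := by
      simp [PySem.List.len_eq]
    rw [h1, PySem.List.pyRange_neg_one_cons
      (lt_of_lt_of_le (show (-1 : Int) < 0 by norm_num) (Int.natCast_nonneg xs.length)),
      List.foldl_cons]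
    have h2 : PySem.List.pyGetD (xs ++ [x]) ((xs.length : Int)) ([] : List β) = x := by
      rw [PySem.List.pyGetD_eq_getElem (i := (xs.length : Int)) _ _ (by positivity)
        (by push_cast [List.length_append, List.length_singleton]; omega)]
      simp only [Int.toNat_natCast]
      exact List.getElem_concat_length rfl _
    rw [h2]
    rw [PySem.List.foldl_congr_mem _ _ (fun sp i => sp ++ PySem.List.pyGetD xs i []) _
      (by
        intro sp i hi
        obtain ⟨hi1, hi2⟩ := PySem.List.mem_pyRange_neg_one.mp hi
        congr 1
        rw [PySem.List.pyGetD_eq_getElem (i := i) _ _ (by omega)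
            (by push_cast [List.length_append, List.length_singleton]; omega),
          PySem.List.pyGetD_eq_getElem (i := i) _ _ (by omega) (by omega)]
        exact List.getElem_append_left (by omega))]
    rw [show (xs.length : Int) - 1 = PySem.List.len xs - 1 by simp [PySem.List.len_eq]]
    rw [ih]
    simp [List.reverse_append]

-- drop a descending range above the maximum occupied value
lemma pvExtendDesc {β : Type} (g : Nat → List β) (M N : Nat) (hMN : M ≤ N)
    (hg : ∀ j, M ≤ j → g j = []) :
    ((List.range N).reverse).flatMap g = ((List.range M).reverse).flatMap g := by
  obtain ⟨k, rfl⟩ : ∃ k, N = M + k := ⟨N - M, by omega⟩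
  rw [List.range_add, List.reverse_append, List.flatMap_append]
  have hnil : ((List.map (fun x => M + x) (List.range k)).reverse).flatMap g = [] := by
    apply List.flatMap_eq_nil_iff.mpr
    intro j hj
    simp only [List.mem_reverse, List.mem_map] at hj
    obtain ⟨i, -, rfl⟩ := hj
    exact hg _ (by omega)
  rw [hnil]
  simp

lemma pvSortIn_eq (ln : List (Int × String)) (h0 : ∀ t ∈ ln, 0 ≤ t.1) :
    pvSortIn ln
      = ((List.range ((ln.foldl (fun m t => max m t.1) (-1)) + 1).toNat).reverse).flatMap
          (fun (c : Nat) => (ln.filter (fun t => t.1 == (c : Int))).map Prod.snd) := by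
  have hmax := PySem.List.le_foldl_max_int ln (fun t : Int × String => t.1) (-1)
  simp only [pvSortIn]
  rw [pvMaxFold]
  have hb : ∀ t ∈ ln, 0 ≤ t.1 ∧ t.1.toNat < ((ln.foldl (fun m t => max m t.1) (-1)) + 1).toNat := by
    intro t ht
    have h1 := h0 t ht
    have h2 := hmax.2 t ht
    exact ⟨h1, by omega⟩
  rw [pvBuckets0, pvFill_eq (fun t : Int × String => t.1) ln _ hb]
  set B := (List.range (((ln.foldl (fun m t => max m t.1) (-1)) + 1).toNat)).map
    (fun (L : Nat) => ln.filter (fun t => t.1 == (L : Int))) with hB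
  have hinner : ∀ (rb : List String) (i : Int),
      (PySem.List.pyRange 0 (PySem.List.len (PySem.List.pyGetD B i [])) 1).foldl
          (fun rb j => rb ++ [(PySem.List.pyGetD (PySem.List.pyGetD B i []) j ((0 : Int), "")).2]) rb
        = rb ++ PySem.List.pyGetD (List.map (List.map Prod.snd) B) i [] := by
    intro rb i
    rw [PySem.List.foldl_pyRange_zero_pyGetD (PySem.List.pyGetD B i []) ((0 : Int), "")
      (fun acc y => acc ++ [y.2]) rb]
    rw [PySem.List.foldl_append_singleton_eq_map]
    congr 1
    rw [← PySem.List.pyGetD_map (List.map Prod.snd) B i []]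
    simp
  rw [PySem.List.foldl_congr_mem _ _
    (fun sp i => sp ++ PySem.List.pyGetD (List.map (List.map Prod.snd) B) i []) []
    (fun rb i _ => hinner rb i)]
  rw [show PySem.List.len B = PySem.List.len (List.map (List.map Prod.snd) B) by
    simp [PySem.List.len_eq]]
  rw [pvDescFold]
  simp only [List.nil_append]
  rw [hB, List.map_map, ← List.map_reverse, ← List.flatMap_def]
  simp [Function.comp_def]

lemma pvClsNil : pvCountLettersAndSort [] = [] := by decide

lemma pvCls_eq (bucket : List String) (N : Nat) (hN : ∀ w ∈ bucket, pvLcN w < N) :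
    pvCountLettersAndSort bucket
      = ((List.range N).reverse).flatMap (fun c => bucket.filter (fun w => pvLcN w == c)) := by
  unfold pvCountLettersAndSort
  rw [PySem.List.foldl_append_singleton_eq_map]
  simp only [List.nil_append]
  rw [pvSortIn_eq _ (by
    intro t ht
    simp only [List.mem_map] at ht
    obtain ⟨w, -, rfl⟩ := ht
    simp [pvCountA_eq])]
  have hfix : ∀ c : Nat,
      ((bucket.map (fun word => (pvCountA word, word))).filter (fun t => t.1 == (c : Int))).map Prod.snd
        = bucket.filter (fun w => pvLcN w == c) := by
    intro c
    rw [List.filter_map, List.map_map]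
    rw [show (Prod.snd ∘ fun word => (pvCountA word, word)) = id from rfl, List.map_id]
    apply List.filter_congr
    intro w _
    rw [Bool.eq_iff_iff]
    simp only [Function.comp_apply, pvCountA_eq, beq_iff_eq]
    exact Int.natCast_inj
  rw [pvFlatMapCongr
    (l := (List.range (((bucket.map (fun word => (pvCountA word, word))).foldl
      (fun m t => max m t.1) (-1)) + 1).toNat).reverse)
    (fun c _ => hfix c)]
  set g : Nat → List String := fun c => bucket.filter (fun w => pvLcN w == c) with hg
  have hpairs := (PySem.List.le_foldl_max_int (bucket.map (fun word => (pvCountA word, word)))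
    (fun t : Int × String => t.1) (-1)).2
  have hMc : ∀ w ∈ bucket, pvLcN w <
      (((bucket.map (fun word => (pvCountA word, word))).foldl (fun m t => max m t.1) (-1)) + 1).toNat := by
    intro w hw
    have hle := hpairs (pvCountA w, w) (List.mem_map.mpr ⟨w, hw, rfl⟩)
    rw [pvCountA_eq] at hle
    omega
  have hgMc : ∀ j, (((bucket.map (fun word => (pvCountA word, word))).foldl
      (fun m t => max m t.1) (-1)) + 1).toNat ≤ j → g j = [] := by
    intro j hj
    apply List.filter_eq_nil_iff.mpr
    intro w hw
    have := hMc w hw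
    simp only [beq_iff_eq]
    omega
  have hgN : ∀ j, N ≤ j → g j = [] := by
    intro j hj
    apply List.filter_eq_nil_iff.mpr
    intro w hw
    have := hN w hw
    simp only [beq_iff_eq]
    omega
  rcases le_total (((bucket.map (fun word => (pvCountA word, word))).foldl
      (fun m t => max m t.1) (-1)) + 1).toNat N with h | h
  · rw [pvExtendDesc g _ N h hgMc]
  · rw [pvExtendDesc g N _ h hgN]

-- guard folds
lemma pvGuardFold (C : List (List String)) :
    C.foldl (fun nb bucket => if bucket ≠ [] then nb ++ [pvCountLettersAndSort bucket] else nb) []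
      = (C.filter (fun b => !(b == []))).map pvCountLettersAndSort := by
  rw [PySem.List.foldl_congr_mem _ _
    (fun nb bucket => if (!(bucket == [])) = true then nb ++ [pvCountLettersAndSort bucket] else nb) []
    (by intro nb b _; by_cases hb : b = [] <;> simp [hb])]
  rw [PySem.List.foldl_append_if]
  simp

lemma pvStrongFold (NB : List (List String)) :
    (PySem.List.pyRange (PySem.List.len NB - 1) (-1) (-1)).foldl
        (fun sp i => if PySem.List.pyGetD NB i [] ≠ [] then sp ++ PySem.List.pyGetD NB i [] else sp) []
      = NB.reverse.flatten := by
  rw [PySem.List.foldl_congr_mem _ _ (fun sp i => sp ++ PySem.List.pyGetD NB i []) []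
    (by intro sp i _; by_cases h : PySem.List.pyGetD NB i [] = [] <;> simp [h])]
  rw [pvDescFold]
  simp

lemma pvFlatFilter (C : List (List String)) :
    ((C.filter (fun b => !(b == []))).map pvCountLettersAndSort).reverse.flatten
      = C.reverse.flatMap pvCountLettersAndSort := by
  rw [← List.map_reverse, ← List.flatMap_def, ← List.filter_reverse]
  generalize C.reverse = D
  induction D with
  | nil => simp
  | cons b D ih =>
    rw [List.filter_cons]
    by_cases hb : b = []
    · subst hb
      rw [if_neg (by simp), List.flatMap_cons, pvClsNil, List.nil_append, ih]
    · rw [if_pos (by simp [hb]), List.flatMap_cons, List.flatMap_cons, ih]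

-- codes T(L)+c for c ≤ L < M enumerate range (T M)
lemma pvCodesRange : ∀ M : Nat,
    (List.range M).flatMap (fun L => (List.range (L + 1)).map (fun c => pvT L + c))
      = List.range (pvT M) := by
  intro M
  induction M with
  | zero => simp [pvT]
  | succ n ih =>
    rw [List.range_succ, List.flatMap_append, ih]
    simp only [List.flatMap_cons, List.flatMap_nil, List.append_nil]
    conv_rhs => rw [show pvT (n + 1) = pvT n + (n + 1) from rfl, List.range_add]

lemma pvDoubleDesc (H : List String) (M : Nat) :
    ((List.range M).reverse).flatMap
        (fun L => ((List.range (L + 1)).reverse).flatMap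
          (fun c => H.filter (fun w => (pvLcN w == c) && (pvLenN w == L))))
      = pvCanon H M := by
  unfold pvCanon
  rw [← pvCodesRange M, List.reverse_flatMap, List.flatMap_assoc]
  apply pvFlatMapCongr
  intro L hL
  simp only [Function.comp_def]
  rw [← List.map_reverse, List.flatMap_map]
  apply pvFlatMapCongr
  intro c hc
  have hcL : c ≤ L := by
    have := List.mem_reverse.mp hc
    simp only [List.mem_range] at this
    omega
  apply List.filter_congr
  intro w _
  rw [Bool.eq_iff_iff]
  simp only [Bool.and_eq_true, beq_iff_eq]
  rw [pcode_eq_iff hcL w]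
  tauto

lemma pvPerL (H : List String) (L : Nat) :
    pvCountLettersAndSort (H.filter (fun p => PySem.Str.len p == ((L : Nat) : Int)))
      = ((List.range (L + 1)).reverse).flatMap
          (fun c => H.filter (fun w => (pvLcN w == c) && (pvLenN w == L))) := by
  rw [List.filter_congr (q := fun w => pvLenN w == L) (fun w _ => by
    rw [Bool.eq_iff_iff]
    simp only [PySem.Str.len_eq, pvLenN, beq_iff_eq]
    exact Int.natCast_inj)]
  rw [pvCls_eq (H.filter (fun w => pvLenN w == L)) (L + 1) (by
    intro w hw
    obtain ⟨-, hbeq⟩ := List.mem_filter.mp hw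
    have h1 : pvLenN w = L := by simpa using hbeq
    have := pvLcN_le w
    omega)]
  exact pvFlatMapCongr (fun c _ => List.filter_filter)

-- A's whole pipeline returns the canonical blocks list
lemma googleA_eq (H : List String) (s : Int) :
    google H s = PySem.List.pyGetD
      (pvCanon H ((H.foldl (fun m p => max m (PySem.Str.len p)) (-1)) + 1).toNat) (s - 1) "" := by
  have hmax := PySem.List.le_foldl_max_int H (fun p => PySem.Str.len p) (-1)
  simp only [google, pvPutIntoBuckets]
  rw [pvMaxFold]
  have h0len : ∀ p : String, (0 : Int) ≤ PySem.Str.len p := by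
    intro p; rw [PySem.Str.len_eq]; positivity
  have hbound : ∀ p ∈ H, 0 ≤ PySem.Str.len p ∧
      (PySem.Str.len p).toNat < ((H.foldl (fun m p => max m (PySem.Str.len p)) (-1)) + 1).toNat := by
    intro p hp
    have h1 := h0len p
    have h2 := hmax.2 p hp
    exact ⟨h1, by omega⟩
  rw [pvBuckets0, pvFill_eq (fun p => PySem.Str.len p) H _ hbound]
  rw [pvGuardFold, pvStrongFold, pvFlatFilter]
  rw [← List.map_reverse, List.flatMap_map]
  rw [pvFlatMapCongr (fun L _ => pvPerL H L)]
  rw [pvDoubleDesc]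

-- B equals the same canonical blocks list
lemma googleAlt_eq (H : List String) (M : Nat) (hcov : ∀ x ∈ H, pvCode x < pvT M) :
    PySem.List.sorted2 H (fun w => -PySem.Str.len w) (fun w => -pvLcB w) false = pvCanon H M := by
  rw [show PySem.List.sorted2 H (fun w => -PySem.Str.len w) (fun w => -pvLcB w) false
      = H.foldl (fun acc x => PySem.List.insertBy
          (fun a b => decide ((-PySem.Str.len a) < (-PySem.Str.len b)) ||
            (!decide ((-PySem.Str.len b) < (-PySem.Str.len a)) && decide ((-pvLcB a) < (-pvLcB b))))
          x acc) [] from rfl]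
  have hfun : (fun a b : String => decide ((-PySem.Str.len a) < (-PySem.Str.len b)) ||
      (!decide ((-PySem.Str.len b) < (-PySem.Str.len a)) && decide ((-pvLcB a) < (-pvLcB b))))
      = fun a b => decide (pvKey a < pvKey b) := by
    funext a b
    rw [Bool.eq_iff_iff]
    simp only [Bool.or_eq_true, Bool.and_eq_true, Bool.not_eq_true', decide_eq_true_eq,
      decide_eq_false_iff_not, PySem.Str.len_eq, pvLcB_eq, pvKey, neg_lt_neg_iff, Nat.cast_lt]
    rw [code_lt_iff a b]
    simp only [pvLenN]
    omega
  rw [hfun]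
  have hks : (((List.range (pvT M)).reverse).map (fun (j : Nat) => -(j : Int))).Pairwise (· < ·) := by
    apply List.pairwise_map.mpr
    apply List.pairwise_reverse.mpr
    exact List.pairwise_lt_range.imp (by intro a b h; omega)
  rw [pvSortBlocks _ hks H (by
    intro x hx
    apply List.mem_map.mpr
    exact ⟨pvCode x, List.mem_reverse.mpr (List.mem_range.mpr (hcov x hx)), rfl⟩)]
  unfold pvBlocks pvCanon
  rw [List.flatMap_map]
  apply pvFlatMapCongr
  intro j hj
  apply List.filter_congr
  intro w _
  rw [Bool.eq_iff_iff]
  simp only [pvKey, beq_iff_eq]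
  omega

-- ===== VERDICT (by name: the statement is the Claim_ definition above) =====
theorem google_spec : Claim_equal_google := by
  unfold Claim_equal_google
  intro H s _hdom _hpre
  unfold Spec_google google_alt
  have hmax := PySem.List.le_foldl_max_int H (fun p => PySem.Str.len p) (-1)
  rw [googleA_eq H s]
  rw [googleAlt_eq H ((H.foldl (fun m p => max m (PySem.Str.len p)) (-1)) + 1).toNat (by
    intro x hx
    have h1 := hmax.2 x hx
    rw [PySem.Str.len_eq] at h1
    have h2 : (0 : Int) ≤ H.foldl (fun m p => max m (PySem.Str.len p)) (-1) :=
      le_trans (by positivity) h1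
    have h3 : pvLenN x + 1 ≤ ((H.foldl (fun m p => max m (PySem.Str.len p)) (-1)) + 1).toNat := by
      unfold pvLenN; omega
    have h4 : pvCode x < pvT (pvLenN x + 1) := by
      have := pvLcN_le x
      unfold pvCode
      simp only [pvT]
      omega
    exact lt_of_lt_of_le h4 (pvT_mono h3))]
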